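-- pv_equiv track=rewrite | github.com/Pet-projects-for-experience/Backend | src/backend/api/v1/projects/mixins.py | _check_not_unique_project_specialists
-- ===== SOURCE A (Python) =====
-- def _check_not_unique_project_specialists(
--     project_specialists_data=None
-- ) -> bool:
--     """
--     Метод проверки дублирования специалистов необходимых проекту по их
--     специальности и грейду.
--     """
--
--     if project_specialists_data is not None:
--         project_specialists_fields = [
--             (data["specialist"], data["level"])
--             for data in project_specialists_data
--         ]
--         if len(project_specialists_data) != len(
--             set(project_specialists_fields)
--         ):
--             return True
--     return False
-- ===== SOURCE B (Python) =====
-- def _check_not_unique_project_specialists(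
--     project_specialists_data=None
-- ) -> bool:
--     """Set-free pairwise scan: each key is searched for in the suffix after it."""
--     if project_specialists_data is None:
--         return False
--     keys = [
--         (data["specialist"], data["level"])
--         for data in project_specialists_data
--     ]
--     for i, key in enumerate(keys):
--         if key in keys[i + 1:]:
--             return True
--     return False
-- ===== Notes on version B (the rewrite author's own statement) =====
-- stated objective: alternative
-- what changed: Replaces the build-a-set-and-compare-cardinalities check by a set-free brute-force scan: each (specialist, level) key is searched for in the suffix of keys after it, returning True at the first repeat; no auxiliary set is built.
import Mathlib
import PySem

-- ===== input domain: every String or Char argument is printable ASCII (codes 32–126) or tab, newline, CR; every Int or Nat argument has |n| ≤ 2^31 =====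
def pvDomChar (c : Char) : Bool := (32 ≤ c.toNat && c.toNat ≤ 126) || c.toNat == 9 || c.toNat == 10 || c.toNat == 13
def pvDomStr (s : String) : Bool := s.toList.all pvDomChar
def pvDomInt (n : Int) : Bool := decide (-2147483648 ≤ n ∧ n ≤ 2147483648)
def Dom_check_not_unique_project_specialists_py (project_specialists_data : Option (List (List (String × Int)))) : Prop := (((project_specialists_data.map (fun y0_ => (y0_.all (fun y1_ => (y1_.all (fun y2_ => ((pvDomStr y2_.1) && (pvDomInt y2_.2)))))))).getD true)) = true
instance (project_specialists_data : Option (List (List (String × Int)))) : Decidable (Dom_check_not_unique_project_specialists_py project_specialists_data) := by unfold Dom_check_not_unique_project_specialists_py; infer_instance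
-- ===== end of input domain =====

-- B replaces A's build-a-set-and-compare-cardinalities check by a set-free
-- brute-force scan: each key is searched for in the suffix of keys after it.

-- ===== PORT A =====
-- data["specialist"] / data["level"]: KeyError excluded by Pre_; under Pre_ the
-- getD defaults are never used.
def pvKey (item : List (String × Int)) : Int × Int :=
  ((PySem.Dict.mk item).getD "specialist" 0, (PySem.Dict.mk item).getD "level" 0)

def check_not_unique_project_specialists_py (project_specialists_data : Option (List (List (String × Int)))) : Bool :=
  match project_specialists_data with
  | none => false
  | some xs =>
    let project_specialists_fields := xs.map pvKey
    if xs.length ≠ (PySem.Set.ofList project_specialists_fields).length then true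
    else false

-- ===== PORT B =====
-- the 'for i, key in enumerate(keys): if key in keys[i+1:]' loop: at step i the
-- slice keys[i+1:] is exactly the rest of the list being recursed over.
def pvSuffixScan (keys : List (Int × Int)) : Bool :=
  match keys with
  | [] => false
  | key :: rest => if rest.contains key then true else pvSuffixScan rest

def check_not_unique_project_specialists_py_alt (project_specialists_data : Option (List (List (String × Int)))) : Bool :=
  match project_specialists_data with
  | none => false
  | some xs => pvSuffixScan (xs.map pvKey)

-- ===== PRECONDITION & SPEC =====
-- Pre_ excludes exactly the inputs where Python's A raises KeyError: an item
-- dict missing the "specialist" or "level" key.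
def Pre_check_not_unique_project_specialists_py (project_specialists_data : Option (List (List (String × Int)))) : Prop :=
  ∀ item ∈ project_specialists_data.getD [],
      (PySem.Dict.mk item).contains "specialist" = true ∧
      (PySem.Dict.mk item).contains "level" = true
instance (project_specialists_data : Option (List (List (String × Int)))) : Decidable (Pre_check_not_unique_project_specialists_py project_specialists_data) := by unfold Pre_check_not_unique_project_specialists_py; infer_instance

def pvWitness_check_not_unique_project_specialists_py : (Option (List (List (String × Int)))) :=
  some [[("specialist", 1), ("level", 2)], [("specialist", 1), ("level", 3)]]

def Spec_check_not_unique_project_specialists_py (project_specialists_data : Option (List (List (String × Int)))) (out : Bool) : Prop := out = check_not_unique_project_specialists_py_alt project_specialists_data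
instance (project_specialists_data : Option (List (List (String × Int)))) (out : Bool) : Decidable (Spec_check_not_unique_project_specialists_py project_specialists_data out) := by unfold Spec_check_not_unique_project_specialists_py; infer_instance

-- ===== CLAIM (what is proved, stated in full; the proofs are below) =====
def Claim_equal_check_not_unique_project_specialists_py : Prop := ∀ (project_specialists_data : Option (List (List (String × Int)))), Dom_check_not_unique_project_specialists_py project_specialists_data → Pre_check_not_unique_project_specialists_py project_specialists_data → Spec_check_not_unique_project_specialists_py project_specialists_data (check_not_unique_project_specialists_py project_specialists_data)

-- ===== LEMMAS AND PROOFS =====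

-- |set(l)| = |l| iff l has no duplicates
theorem pv_len_ofList_eq_iff {α : Type} [BEq α] [LawfulBEq α] (l : List α) :
    (PySem.Set.ofList l).length = l.length ↔ l.Nodup := by
  constructor
  · intro h
    induction l with
    | nil => exact List.nodup_nil
    | cons x xs ih =>
      rw [PySem.Set.ofList_cons] at h
      simp only [List.length_cons, Nat.succ.injEq] at h
      by_cases hx : x ∈ xs
      · exfalso
        have hd : ((PySem.Set.ofList xs).discard x).length < (PySem.Set.ofList xs).length := by
          have hmem : x ∈ PySem.Set.ofList xs := (PySem.Set.mem_ofList _ _).2 hx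
          unfold PySem.Set.discard
          apply List.length_filter_lt_length_iff_exists.2
          exact ⟨x, hmem, by simp⟩
        have hle := PySem.Set.length_ofList_le xs
        omega
      · have heq : (PySem.Set.ofList xs).discard x = PySem.Set.ofList xs := by
          unfold PySem.Set.discard
          apply List.filter_eq_self.2
          intro a ha
          have hax : a ∈ xs := (PySem.Set.mem_ofList _ _).1 ha
          simp only [Bool.not_eq_eq_eq_not, Bool.not_true]
          exact beq_eq_false_iff_ne.mpr (fun h => hx (h ▸ hax))
        rw [heq] at h
        exact List.Nodup.cons hx (ih h)
  · intro h
    rw [PySem.Set.ofList_eq_self_of_nodup _ h]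

-- the suffix scan returns true exactly when the key list has a duplicate
theorem pv_suffixScan_eq (keys : List (Int × Int)) :
    pvSuffixScan keys = !decide keys.Nodup := by
  induction keys with
  | nil => simp [pvSuffixScan]
  | cons k rest ih =>
    simp only [pvSuffixScan, ih, List.nodup_cons]
    by_cases hk : k ∈ rest
    · simp [hk]
    · simp [hk]

-- ===== VERDICT (by name: the statement is the Claim_ definition above) =====
theorem check_not_unique_project_specialists_py_spec : Claim_equal_check_not_unique_project_specialists_py := by
  intro d _ _
  unfold Spec_check_not_unique_project_specialists_py
  cases d with
  | none => rfl
  | some xs =>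
    simp only [check_not_unique_project_specialists_py, check_not_unique_project_specialists_py_alt]
    rw [pv_suffixScan_eq]
    by_cases h : (xs.map pvKey).Nodup
    · have he : (PySem.Set.ofList (xs.map pvKey)).length = xs.length := by
        rw [(pv_len_ofList_eq_iff _).2 h, List.length_map]
      simp [he, h]
    · have hne : xs.length ≠ (PySem.Set.ofList (xs.map pvKey)).length := by
        intro he
        have hl : (xs.map pvKey).length = xs.length := List.length_map pvKey
        exact h ((pv_len_ofList_eq_iff _).1 (by omega))
      simp [hne, h]
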